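-- pv_equiv track=rewrite | github.com/jmdubish1/KmeansAlgoParamOpt | general_tools/basic_tools.py | arrange_daily_df_cols
-- ===== SOURCE A (Python) =====
-- def arrange_daily_df_cols(input_features):
--     new_arrange = ['ATR_int', 'Vol_int']
--     suffixes = ['_Open', '_Close', '_Open_Scale', '_Close_Scale',  '_HL_diff', '_ATR_day', '_RSI_k',
--                 '_RSI_d', '_Vol', '_VolAvg', '_OI', '_OpenInt']
--     for suffix in suffixes:
--         for col_name in input_features:
--             if col_name.endswith(suffix):
--                 new_arrange.append(col_name)
--
--     return new_arrange
-- ===== SOURCE B (Python) =====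
-- def arrange_daily_df_cols(input_features):
--     suffixes = ['_Open', '_Close', '_Open_Scale', '_Close_Scale', '_HL_diff', '_ATR_day', '_RSI_k',
--                 '_RSI_d', '_Vol', '_VolAvg', '_OI', '_OpenInt']
--     # one grouping pass: drop each column into the bucket of the (unique) suffix it ends with
--     buckets = [[] for _ in suffixes]
--     for col in input_features:
--         for bucket, suffix in zip(buckets, suffixes):
--             if col.endswith(suffix):
--                 bucket.append(col)
--                 break
--     out = ['ATR_int', 'Vol_int']
--     for bucket in buckets:
--         out += bucket
--     return out
-- ===== Notes on version B (the rewrite author's own statement) =====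
-- stated objective: alternative
-- what changed: Instead of A's 12 repeated scans of input_features (one per suffix), B makes a single grouping pass dropping each column into the bucket of the unique suffix it ends with, then concatenates the buckets in the fixed suffix-priority order.
import Mathlib
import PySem

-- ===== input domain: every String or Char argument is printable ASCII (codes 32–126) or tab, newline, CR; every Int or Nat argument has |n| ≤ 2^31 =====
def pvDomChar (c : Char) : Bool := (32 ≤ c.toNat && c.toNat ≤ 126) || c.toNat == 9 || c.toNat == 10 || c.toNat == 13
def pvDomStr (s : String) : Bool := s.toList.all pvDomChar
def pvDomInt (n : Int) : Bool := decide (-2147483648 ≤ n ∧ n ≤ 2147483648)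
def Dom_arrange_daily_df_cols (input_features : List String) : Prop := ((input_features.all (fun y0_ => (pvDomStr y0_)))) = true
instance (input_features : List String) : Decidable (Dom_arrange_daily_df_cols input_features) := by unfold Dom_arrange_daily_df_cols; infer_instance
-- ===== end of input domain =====

-- B replaces A's 12 repeated scans of input_features by a single grouping pass into
-- per-suffix buckets (first matching suffix, which is unique), assembled in suffix order.

-- ===== PORT A =====
def arrange_daily_df_cols (input_features : List String) : List String :=
  let suffixes := ["_Open", "_Close", "_Open_Scale", "_Close_Scale", "_HL_diff", "_ATR_day",
                   "_RSI_k", "_RSI_d", "_Vol", "_VolAvg", "_OI", "_OpenInt"]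
  suffixes.foldl
    (fun new_arrange suffix =>
      input_features.foldl
        (fun new_arrange col_name =>
          if PySem.Str.endswith col_name suffix then new_arrange ++ [col_name] else new_arrange)
        new_arrange)
    ["ATR_int", "Vol_int"]

-- ===== PORT B =====
-- inner 'for bucket, suffix in zip(buckets, suffixes): if col.endswith(suffix): bucket.append(col); break'
def pvAltAdd : List (List String) → List String → String → List (List String)
  | bs, [], _ => bs
  | [], _ :: _, _ => []
  | b :: bs, s :: ss, col =>
      if PySem.Str.endswith col s then (b ++ [col]) :: bs
      else b :: pvAltAdd bs ss col

def arrange_daily_df_cols_alt (input_features : List String) : List String :=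
  let suffixes := ["_Open", "_Close", "_Open_Scale", "_Close_Scale", "_HL_diff", "_ATR_day",
                   "_RSI_k", "_RSI_d", "_Vol", "_VolAvg", "_OI", "_OpenInt"]
  let buckets := input_features.foldl (fun bs col => pvAltAdd bs suffixes col)
                   (suffixes.map (fun _ => ([] : List String)))
  buckets.foldl (fun out b => out ++ b) ["ATR_int", "Vol_int"]

-- ===== PRECONDITION & SPEC =====
def Spec_arrange_daily_df_cols (input_features : List String) (out : List String) : Prop := out = arrange_daily_df_cols_alt input_features
instance (input_features : List String) (out : List String) : Decidable (Spec_arrange_daily_df_cols input_features out) := by unfold Spec_arrange_daily_df_cols; infer_instance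

-- ===== CLAIM (what is proved, stated in full; the proofs are below) =====
def Claim_equal_arrange_daily_df_cols : Prop := ∀ (input_features : List String), Dom_arrange_daily_df_cols input_features → Spec_arrange_daily_df_cols input_features (arrange_daily_df_cols input_features)

-- ===== LEMMAS AND PROOFS =====

-- no two distinct positions of the suffix list can both match one column:
-- because no listed suffix is a suffix of another (checked by decide below)
def pvExclusive (ss : List String) : Prop :=
  List.Pairwise (fun s1 s2 => ∀ c : String,
    PySem.Str.endswith c s1 = true → PySem.Str.endswith c s2 = true → False) ss

lemma pvExclusive_of_noSuffix (ss : List String)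
    (h : List.Pairwise (fun s1 s2 =>
      ¬ s1.toList <:+ s2.toList ∧ ¬ s2.toList <:+ s1.toList) ss) : pvExclusive ss := by
  refine h.imp ?_
  intro s1 s2 hns c h1 h2
  rw [PySem.Str.endswith_eq, PySem.Chars.endswith_iff] at h1 h2
  rcases List.suffix_or_suffix_of_suffix h1 h2 with hs | hs
  · exact hns.1 hs
  · exact hns.2 hs

lemma pvZipWith_id (bs : List (List String)) (ss : List String)
    (h : bs.length = ss.length) :
    List.zipWith (fun (b : List String) (_ : String) => b) bs ss = bs := by
  induction bs generalizing ss with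
  | nil => simp
  | cons b bs ih =>
      cases ss with
      | nil => simp at h
      | cons s ss =>
          simp only [List.length_cons, Nat.add_right_cancel_iff] at h
          simp only [List.zipWith_cons_cons, ih ss h]

lemma pvZipWith_no_match (col : String) (bs : List (List String)) (ss : List String)
    (h : bs.length = ss.length)
    (hn : ∀ s ∈ ss, PySem.Str.endswith col s ≠ true) :
    List.zipWith (fun b s => if PySem.Str.endswith col s then b ++ [col] else b) bs ss = bs := by
  induction bs generalizing ss with
  | nil => simp
  | cons b bs ih =>
      cases ss with
      | nil => simp at h
      | cons s ss =>
          simp only [List.length_cons, Nat.add_right_cancel_iff] at h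
          rw [List.zipWith_cons_cons, if_neg (hn s (by simp)),
            ih ss h (fun s' hs' => hn s' (by simp [hs']))]

lemma pvAltAdd_eq_zipWith (ss : List String) (hp : pvExclusive ss)
    (bs : List (List String)) (h : bs.length = ss.length) (col : String) :
    pvAltAdd bs ss col
      = List.zipWith (fun b s => if PySem.Str.endswith col s then b ++ [col] else b) bs ss := by
  induction ss generalizing bs with
  | nil =>
      cases bs with
      | nil => rfl
      | cons b bs => simp at h
  | cons s ss ih =>
      cases bs with
      | nil => simp at h
      | cons b bs =>
          simp only [List.length_cons, Nat.add_right_cancel_iff] at h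
          rcases List.pairwise_cons.mp hp with ⟨hhead, htail⟩
          by_cases hm : PySem.Str.endswith col s = true
          · rw [List.zipWith_cons_cons, if_pos hm,
              pvZipWith_no_match col bs ss h (fun s' hs' h2 => hhead s' hs' col hm h2)]
            simp only [pvAltAdd, if_pos hm]
          · rw [List.zipWith_cons_cons, if_neg hm]
            simp only [pvAltAdd, if_neg hm, ih htail bs h]

lemma pvFold_buckets (ss : List String) (hp : pvExclusive ss) (xs : List String) :
    ∀ bs : List (List String), bs.length = ss.length →
    xs.foldl (fun bs col => pvAltAdd bs ss col) bs
      = List.zipWith (fun b s => b ++ xs.filter (fun c => PySem.Str.endswith c s)) bs ss := by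
  induction xs with
  | nil =>
      intro bs h
      simp only [List.foldl_nil, List.filter_nil, List.append_nil]
      exact (pvZipWith_id bs ss h).symm
  | cons x xs ih =>
      intro bs h
      have hlen : (List.zipWith (fun b s => if PySem.Str.endswith x s then b ++ [x] else b) bs ss).length = ss.length := by
        simp [List.length_zipWith, h]
      calc (x :: xs).foldl (fun bs col => pvAltAdd bs ss col) bs
          = xs.foldl (fun bs col => pvAltAdd bs ss col) (pvAltAdd bs ss x) := rfl
        _ = List.zipWith (fun b s => b ++ xs.filter (fun c => PySem.Str.endswith c s))
              (List.zipWith (fun b s => if PySem.Str.endswith x s then b ++ [x] else b) bs ss) ss := by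
            rw [pvAltAdd_eq_zipWith ss hp bs h x]; exact ih _ hlen
        _ = List.zipWith (fun b s => b ++ (x :: xs).filter (fun c => PySem.Str.endswith c s)) bs ss := by
            clear hlen ih hp h
            induction bs generalizing ss with
            | nil => simp
            | cons b bs ihb =>
                cases ss with
                | nil => rfl
                | cons s ss =>
                    rw [List.zipWith_cons_cons, List.zipWith_cons_cons, List.zipWith_cons_cons, ihb ss]
                    rw [List.filter_cons]
                    by_cases hm : PySem.Str.endswith x s = true
                    · rw [if_pos hm, if_pos hm]; simp
                    · rw [if_neg hm, if_neg hm]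

lemma pvMapFilter (ss : List String) (xs : List String) :
    List.zipWith (fun b s => b ++ xs.filter (fun c => PySem.Str.endswith c s))
        (ss.map (fun _ => ([] : List String))) ss
      = ss.map (fun s => xs.filter (fun c => PySem.Str.endswith c s)) := by
  induction ss with
  | nil => rfl
  | cons s ss ih =>
      simp only [List.map_cons, List.zipWith_cons_cons, List.nil_append, ih]

-- ===== VERDICT (by name: the statement is the Claim_ definition above) =====
theorem arrange_daily_df_cols_spec : Claim_equal_arrange_daily_df_cols := by
  intro xs _
  show arrange_daily_df_cols xs = arrange_daily_df_cols_alt xs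
  have hp : pvExclusive ["_Open", "_Close", "_Open_Scale", "_Close_Scale", "_HL_diff", "_ATR_day",
      "_RSI_k", "_RSI_d", "_Vol", "_VolAvg", "_OI", "_OpenInt"] :=
    pvExclusive_of_noSuffix _ (by decide)
  simp only [arrange_daily_df_cols, arrange_daily_df_cols_alt]
  rw [pvFold_buckets _ hp xs _ (by simp), pvMapFilter]
  simp only [PySem.List.foldl_append_if_eq_filter, PySem.List.foldl_append_eq_flatMap,
    PySem.List.foldl_append_eq_flatten, List.flatMap_def]
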